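-- pv_equiv track=rewrite | github.com/wolketich/fundingConvert | main.py | identify_term_non_term_times
-- ===== SOURCE A (Python) =====
-- def identify_term_non_term_times(hours_list):
--     hours_list = sorted(set(hours_list))  # Remove duplicates and sort
--     if len(hours_list) == 1:
--         return str(hours_list[0])
--
--     # Group hours into term/non-term pairs
--     pairs = []
--     used = set()
--     for i in range(len(hours_list)):
--         for j in range(i + 1, len(hours_list)):
--             if abs(hours_list[j] - hours_list[i]) in [9, 12, 15] and hours_list[i] not in used and hours_list[j] not in used:
--                 pairs.append((hours_list[i], hours_list[j]))
--                 used.add(hours_list[i])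
--                 used.add(hours_list[j])
--
--     # If there are pairs, format them
--     if pairs:
--         pairs_str = [f"{pair[0]}/{pair[1]}" for pair in pairs]
--         return ", ".join(pairs_str)
--
--     # If no pairs, format as changing hours
--     remaining_hours = [str(hour) for hour in hours_list if hour not in used]
--     return "-".join(remaining_hours)
-- ===== SOURCE B (Python) =====
-- def identify_term_non_term_times(hours_list):
--     hs = sorted(set(hours_list))
--     if len(hs) == 1:
--         return str(hs[0])
--     present = set(hs)
--     used = set()
--     pair_strs = []
--     for h in hs:
--         if h in used:
--             continue
--         for d in (9, 12, 15):
--             p = h + d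
--             if p in present and p not in used:
--                 pair_strs.append(f"{h}/{p}")
--                 used.add(h)
--                 used.add(p)
--                 break
--     if pair_strs:
--         return ", ".join(pair_strs)
--     return "-".join(str(h) for h in hs)
-- ===== Notes on version B (the rewrite author's own statement) =====
-- stated objective: faster
-- what changed: A's nested all-pairs index scan with repeated set checks is replaced by a single pass over the sorted unique hours that looks up the only three admissible partners h+9/h+12/h+15 in a hash set (greedy order preserved by sortedness).
import Mathlib
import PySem

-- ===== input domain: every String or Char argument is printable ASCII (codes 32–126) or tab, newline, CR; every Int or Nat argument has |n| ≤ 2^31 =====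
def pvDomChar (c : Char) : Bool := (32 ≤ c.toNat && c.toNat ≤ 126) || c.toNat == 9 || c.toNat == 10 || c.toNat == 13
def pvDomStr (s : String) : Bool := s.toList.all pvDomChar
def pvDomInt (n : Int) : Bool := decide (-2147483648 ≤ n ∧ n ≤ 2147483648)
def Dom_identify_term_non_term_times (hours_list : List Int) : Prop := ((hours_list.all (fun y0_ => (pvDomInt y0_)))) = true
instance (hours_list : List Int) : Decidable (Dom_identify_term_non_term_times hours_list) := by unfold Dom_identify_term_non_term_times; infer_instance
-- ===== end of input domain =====

-- B replaces A's quadratic all-pairs scan by a single pass over the sorted unique hours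
-- that looks up the three admissible partners h+9/h+12/h+15 in a set (same return value).

-- ===== PORT A =====
-- A-side helpers: the f-string f"{a}/{b}" and the body of the inner loop, named for readability
def pvFmt (p : Int × Int) : String := PySem.Int.toStr p.1 ++ "/" ++ PySem.Int.toStr p.2

def pvStepA (hi hj : Int) (st : List (Int × Int) × PySem.Set Int) :
    List (Int × Int) × PySem.Set Int :=
  if ([(9 : Int), 12, 15]).contains |hj - hi| && !PySem.Set.contains st.2 hi
      && !PySem.Set.contains st.2 hj then
    (st.1 ++ [(hi, hj)], PySem.Set.add (PySem.Set.add st.2 hi) hj)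
  else st

def identify_term_non_term_times (hours_list : List Int) : String :=
  let hs := PySem.List.sorted (PySem.Set.ofList hours_list) (fun x => x) false
  if hs.length = 1 then
    PySem.Int.toStr (PySem.List.pyGetD hs 0 0)
  else
    let st := (PySem.List.pyRange 0 (PySem.List.len hs) 1).foldl
      (fun st i =>
        (PySem.List.pyRange (i + 1) (PySem.List.len hs) 1).foldl
          (fun st j => pvStepA (PySem.List.pyGetD hs i 0) (PySem.List.pyGetD hs j 0) st)
          st)
      (([] : List (Int × Int)), ([] : PySem.Set Int))
    if st.1 ≠ [] then
      PySem.Str.join ", " (st.1.map pvFmt)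
    else
      PySem.Str.join "-" ((hs.filter (fun h => !PySem.Set.contains st.2 h)).map (fun h => PySem.Int.toStr h))

-- ===== PORT B =====
-- B-side helper: the body of B's single loop (try the partners h+9, h+12, h+15 in order)
def pvStepB (present : PySem.Set Int) (st : List String × PySem.Set Int) (h : Int) :
    List String × PySem.Set Int :=
  if PySem.Set.contains st.2 h then st
  else
    match ([(9 : Int), 12, 15]).find?
        (fun d => PySem.Set.contains present (h + d) && !PySem.Set.contains st.2 (h + d)) with
    | some d =>
        (st.1 ++ [PySem.Int.toStr h ++ "/" ++ PySem.Int.toStr (h + d)],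
         PySem.Set.add (PySem.Set.add st.2 h) (h + d))
    | none => st

def identify_term_non_term_times_alt (hours_list : List Int) : String :=
  let hs := PySem.List.sorted (PySem.Set.ofList hours_list) (fun x => x) false
  if hs.length = 1 then
    PySem.Int.toStr (PySem.List.pyGetD hs 0 0)
  else
    let present : PySem.Set Int := PySem.Set.ofList hs
    let st := hs.foldl (pvStepB present) (([] : List String), ([] : PySem.Set Int))
    if st.1 ≠ [] then
      PySem.Str.join ", " st.1
    else
      PySem.Str.join "-" (hs.map (fun h => PySem.Int.toStr h))

-- ===== PRECONDITION & SPEC =====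
def Spec_identify_term_non_term_times (hours_list : List Int) (out : String) : Prop := out = identify_term_non_term_times_alt hours_list
instance (hours_list : List Int) (out : String) : Decidable (Spec_identify_term_non_term_times hours_list out) := by unfold Spec_identify_term_non_term_times; infer_instance

-- ===== CLAIM (what is proved, stated in full; the proofs are below) =====
def Claim_equal_identify_term_non_term_times : Prop := ∀ (hours_list : List Int), Dom_identify_term_non_term_times hours_list → Spec_identify_term_non_term_times hours_list (identify_term_non_term_times hours_list)

-- ===== LEMMAS AND PROOFS =====

/-- A's inner loop over the elements after position i, on values -/
def pvInner (h : Int) (t : List Int) (st : List (Int × Int) × PySem.Set Int) :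
    List (Int × Int) × PySem.Set Int :=
  t.foldl (fun st x => pvStepA h x st) st

/-- A's outer loop, recast as structural recursion over the tails of hs -/
def pvOuter : List Int → List (Int × Int) × PySem.Set Int → List (Int × Int) × PySem.Set Int
  | [], st => st
  | h :: t, st => pvOuter t (pvInner h t st)

lemma pvRangeInner (hs : List Int) (h : Int) :
    ∀ (k a : Nat) (st : List (Int × Int) × PySem.Set Int), hs.length - a = k →
    (PySem.List.pyRange (a : Int) (hs.length : Int) 1).foldl
      (fun st j => pvStepA h (PySem.List.pyGetD hs j 0) st) st
    = pvInner h (hs.drop a) st := by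
  intro k
  induction k with
  | zero =>
    intro a st hk
    have ha : hs.length ≤ a := by omega
    rw [PySem.List.pyRange_one_eq_nil (by exact_mod_cast ha), List.drop_eq_nil_of_le ha]
    rfl
  | succ n ih =>
    intro a st hk
    have ha : a < hs.length := by omega
    rw [PySem.List.pyRange_one_cons (by exact_mod_cast ha), List.foldl_cons]
    rw [show ((a : Int) + 1) = ((a + 1 : Nat) : Int) by push_cast; ring]
    rw [ih (a + 1) _ (by omega)]
    rw [List.drop_eq_getElem_cons ha]
    rw [show PySem.List.pyGetD hs (a : Int) 0 = hs[a] by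
      simp [List.getD_eq_getElem?_getD, List.getElem?_eq_getElem ha]]
    rfl

lemma pvRangeOuter (hs : List Int) :
    ∀ (k a : Nat) (st : List (Int × Int) × PySem.Set Int), hs.length - a = k →
    (PySem.List.pyRange (a : Int) (hs.length : Int) 1).foldl
      (fun st i =>
        (PySem.List.pyRange (i + 1) (hs.length : Int) 1).foldl
          (fun st j => pvStepA (PySem.List.pyGetD hs i 0) (PySem.List.pyGetD hs j 0) st) st) st
    = pvOuter (hs.drop a) st := by
  intro k
  induction k with
  | zero =>
    intro a st hk
    have ha : hs.length ≤ a := by omega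
    rw [PySem.List.pyRange_one_eq_nil (by exact_mod_cast ha), List.drop_eq_nil_of_le ha]
    rfl
  | succ n ih =>
    intro a st hk
    have ha : a < hs.length := by omega
    rw [PySem.List.pyRange_one_cons (by exact_mod_cast ha), List.foldl_cons]
    rw [show ((a : Int) + 1) = ((a + 1 : Nat) : Int) by push_cast; ring]
    rw [pvRangeInner hs _ (hs.length - (a + 1)) (a + 1) _ rfl]
    rw [ih (a + 1) _ (by omega)]
    rw [List.drop_eq_getElem_cons ha]
    rw [show PySem.List.pyGetD hs (a : Int) 0 = hs[a] by
      simp [List.getD_eq_getElem?_getD, List.getElem?_eq_getElem ha]]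
    rfl

lemma pvInner_of_used (h : Int) :
    ∀ (t : List Int) (ps : List (Int × Int)) (used : PySem.Set Int),
    PySem.Set.contains used h = true → pvInner h t (ps, used) = (ps, used) := by
  intro t
  induction t with
  | nil => intro ps used hu; rfl
  | cons x t' ih =>
    intro ps used hu
    show pvInner h t' (pvStepA h x (ps, used)) = (ps, used)
    have hu' : h ∈ used := (PySem.Set.contains_iff _ _).mp hu
    have hst : pvStepA h x (ps, used) = (ps, used) := by simp [pvStepA, hu']
    rw [hst]; exact ih ps used hu

/-- characterisation of A's inner scan on a strictly increasing suffix -/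
lemma pvInnerChar (h : Int) :
    ∀ (t : List Int), t.Pairwise (· < ·) → (∀ x ∈ t, h < x) →
    ∀ (ps : List (Int × Int)) (used : PySem.Set Int),
    pvInner h t (ps, used)
    = if PySem.Set.contains used h then (ps, used)
      else
        match ([(9 : Int), 12, 15]).find?
            (fun d => decide ((h + d) ∈ t) && !PySem.Set.contains used (h + d)) with
        | some d => (ps ++ [(h, h + d)], PySem.Set.add (PySem.Set.add used h) (h + d))
        | none => (ps, used) := by
  intro t
  induction t with
  | nil =>
    intro _ _ ps used
    cases hc : PySem.Set.contains used h <;> simp [pvInner, List.find?, hc]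
  | cons x t' ih =>
    intro hpw hgt ps used
    have hx : h < x := hgt x List.mem_cons_self
    obtain ⟨hall, hpw'⟩ := List.pairwise_cons.mp hpw
    have hgt' : ∀ y ∈ t', h < y := fun y hy => hgt y (List.mem_cons_of_mem _ hy)
    show pvInner h t' (pvStepA h x (ps, used)) = _
    by_cases hu : PySem.Set.contains used h = true
    · have hu' : h ∈ used := (PySem.Set.contains_iff _ _).mp hu
      have hst : pvStepA h x (ps, used) = (ps, used) := by simp [pvStepA, hu']
      rw [hst, ih hpw' hgt' ps used, if_pos hu, if_pos hu]
    · have hu' : h ∉ used := fun hm => hu ((PySem.Set.contains_iff _ _).mpr hm)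
      rw [if_neg hu]
      by_cases hmem : x = h + 9 ∨ x = h + 12 ∨ x = h + 15
      · by_cases hux : PySem.Set.contains used x = true
        · -- partner already used: head step is a no-op and the head candidate fails anyway
          have hux' : x ∈ used := (PySem.Set.contains_iff _ _).mp hux
          have hst : pvStepA h x (ps, used) = (ps, used) := by simp [pvStepA, hux']
          rw [hst, ih hpw' hgt' ps used, if_neg hu]
          rcases hmem with rfl | rfl | rfl
          · simp [List.find?, List.mem_cons, hux, hux',
              (show ¬(h + 12 = h + 9) by omega), (show ¬(h + 15 = h + 9) by omega)]
          · simp [List.find?, List.mem_cons, hux, hux',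
              (show ¬(h + 9 = h + 12) by omega), (show ¬(h + 15 = h + 12) by omega)]
          · simp [List.find?, List.mem_cons, hux, hux',
              (show ¬(h + 9 = h + 15) by omega), (show ¬(h + 12 = h + 15) by omega)]
        · -- the pair (h, x) fires
          have hux' : x ∉ used := fun hm => hux ((PySem.Set.contains_iff _ _).mpr hm)
          have hst : pvStepA h x (ps, used)
              = (ps ++ [(h, x)], PySem.Set.add (PySem.Set.add used h) x) := by
            rcases hmem with rfl | rfl | rfl <;>
              simp [pvStepA, hu', hux', (show h + 9 - h = 9 by ring),
                (show h + 12 - h = 12 by ring), (show h + 15 - h = 15 by ring),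
                abs_of_pos (show (0:Int) < 9 by norm_num),
                abs_of_pos (show (0:Int) < 12 by norm_num),
                abs_of_pos (show (0:Int) < 15 by norm_num)]
          rw [hst]
          have hused : PySem.Set.contains (PySem.Set.add (PySem.Set.add used h) x) h = true :=
            (PySem.Set.contains_iff _ _).mpr (by simp [PySem.Set.mem_add])
          rw [pvInner_of_used h t' _ _ hused]
          rcases hmem with rfl | rfl | rfl
          · simp [List.find?, List.mem_cons, hux, hux']
          · have h9 : (h + 9) ∉ t' := fun hm => absurd (hall _ hm) (by omega)
            simp [List.find?, List.mem_cons, hux, hux', h9,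
              (show ¬(h + 9 = h + 12) by omega)]
          · have h9 : (h + 9) ∉ t' := fun hm => absurd (hall _ hm) (by omega)
            have h12 : (h + 12) ∉ t' := fun hm => absurd (hall _ hm) (by omega)
            simp [List.find?, List.mem_cons, hux, hux', h9, h12,
              (show ¬(h + 9 = h + 15) by omega), (show ¬(h + 12 = h + 15) by omega)]
      · -- x is no candidate partner of h: no-op, and memberships are unchanged
        have habs : |x - h| = x - h := abs_of_pos (by omega)
        have hst : pvStepA h x (ps, used) = (ps, used) := by
          simp [pvStepA, habs, (show x - h ≠ 9 by omega), (show x - h ≠ 12 by omega),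
            (show x - h ≠ 15 by omega)]
        rw [hst, ih hpw' hgt' ps used, if_neg hu]
        simp [List.find?, List.mem_cons, (show ¬(h + 9 = x) by omega),
          (show ¬(h + 12 = x) by omega), (show ¬(h + 15 = x) by omega)]

/-- the joint induction: B's one pass tracks A's outer loop -/
lemma pvMain (hs : List Int) (hp : hs.Pairwise (· < ·)) :
    ∀ (t pre : List Int), hs = pre ++ t →
    ∀ (ps : List (Int × Int)) (used : PySem.Set Int),
    t.foldl (pvStepB (PySem.Set.ofList hs)) (ps.map pvFmt, used)
    = ((pvOuter t (ps, used)).1.map pvFmt, (pvOuter t (ps, used)).2) := by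
  intro t
  induction t with
  | nil => intro pre _ ps used; rfl
  | cons hd t' ih =>
    intro pre heq ps used
    have hpw : (pre ++ hd :: t').Pairwise (· < ·) := heq ▸ hp
    have hmid := List.pairwise_append.mp hpw
    obtain ⟨hall, hpw'⟩ := List.pairwise_cons.mp hmid.2.1
    have hmemEq : ∀ d : Int, 0 < d →
        PySem.Set.contains (PySem.Set.ofList hs) (hd + d) = decide ((hd + d) ∈ t') := by
      intro d hd0
      by_cases hm : (hd + d) ∈ t'
      · have hm' : (hd + d) ∈ hs := by rw [heq]; simp [hm]
        simp [hm, hm']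
      · have hm' : (hd + d) ∉ hs := by
          rw [heq]
          intro hmm
          rcases List.mem_append.mp hmm with hpre | hc
          · exact absurd (hmid.2.2 _ hpre hd List.mem_cons_self) (by omega)
          · rcases List.mem_cons.mp hc with he | ht
            · omega
            · exact hm ht
        simp [hm, hm']
    have e9 := hmemEq 9 (by norm_num)
    have e12 := hmemEq 12 (by norm_num)
    have e15 := hmemEq 15 (by norm_num)
    have hstep : pvStepB (PySem.Set.ofList hs) (ps.map pvFmt, used) hd
        = ((pvInner hd t' (ps, used)).1.map pvFmt, (pvInner hd t' (ps, used)).2) := by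
      rw [pvInnerChar hd t' hpw' hall ps used]
      simp only [pvStepB, List.find?, e9, e12, e15]
      by_cases hu : PySem.Set.contains used hd = true
      · have hu' : hd ∈ used := (PySem.Set.contains_iff _ _).mp hu
        simp [hu, hu']
      · have hub : PySem.Set.contains used hd = false := by simpa using hu
        have hun : hd ∉ used := fun hm => hu ((PySem.Set.contains_iff _ _).mpr hm)
        cases h9 : (decide ((hd + 9) ∈ t') && !PySem.Set.contains used (hd + 9)) <;>
          cases h12 : (decide ((hd + 12) ∈ t') && !PySem.Set.contains used (hd + 12)) <;>
            cases h15 : (decide ((hd + 15) ∈ t') && !PySem.Set.contains used (hd + 15)) <;>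
              simp [hub, hun, h9, h12, h15, pvFmt]
    rw [List.foldl_cons, hstep]
    have hpre' : hs = (pre ++ [hd]) ++ t' := by rw [heq]; simp
    have := ih (pre ++ [hd]) hpre' (pvInner hd t' (ps, used)).1 (pvInner hd t' (ps, used)).2
    simp only [Prod.mk.eta] at this
    rw [this]
    rfl

lemma pvInner_inv (h : Int) :
    ∀ (t : List Int) (st : List (Int × Int) × PySem.Set Int),
    ∃ δ, (pvInner h t st).1 = st.1 ++ δ ∧ (δ = [] → (pvInner h t st).2 = st.2) := by
  intro t
  induction t with
  | nil => intro st; exact ⟨[], by simp [pvInner]⟩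
  | cons x t' ih =>
    intro st
    show ∃ δ, (pvInner h t' (pvStepA h x st)).1 = st.1 ++ δ ∧
      (δ = [] → (pvInner h t' (pvStepA h x st)).2 = st.2)
    obtain ⟨δ', h1, h2⟩ := ih (pvStepA h x st)
    by_cases hc : (([(9 : Int), 12, 15]).contains |x - h| && !PySem.Set.contains st.2 h
        && !PySem.Set.contains st.2 x) = true
    · have hst : pvStepA h x st = (st.1 ++ [(h, x)], PySem.Set.add (PySem.Set.add st.2 h) x) := by
        simp only [pvStepA]; rw [if_pos hc]
      refine ⟨(h, x) :: δ', ?_, ?_⟩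
      · rw [h1, hst]; simp
      · intro hδ; simp at hδ
    · have hst : pvStepA h x st = st := by
        simp only [pvStepA]; rw [if_neg hc]
      rw [hst] at h1 h2 ⊢
      exact ⟨δ', h1, h2⟩

lemma pvOuter_inv :
    ∀ (t : List Int) (st : List (Int × Int) × PySem.Set Int),
    ∃ δ, (pvOuter t st).1 = st.1 ++ δ ∧ (δ = [] → (pvOuter t st).2 = st.2) := by
  intro t
  induction t with
  | nil => intro st; exact ⟨[], by simp [pvOuter]⟩
  | cons x t' ih =>
    intro st
    obtain ⟨δ1, i1, i2⟩ := pvInner_inv x t' st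
    obtain ⟨δ2, o1, o2⟩ := ih (pvInner x t' st)
    refine ⟨δ1 ++ δ2, ?_, ?_⟩
    · show (pvOuter t' (pvInner x t' st)).1 = st.1 ++ (δ1 ++ δ2)
      rw [o1, i1, List.append_assoc]
    · intro hδ
      rw [List.append_eq_nil_iff] at hδ
      show (pvOuter t' (pvInner x t' st)).2 = st.2
      rw [o2 hδ.2, i2 hδ.1]

-- ===== VERDICT (by name: the statement is the Claim_ definition above) =====
theorem identify_term_non_term_times_spec : Claim_equal_identify_term_non_term_times := by
  intro xs _
  unfold Spec_identify_term_non_term_times identify_term_non_term_times identify_term_non_term_times_alt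
  simp only [PySem.List.len_eq]
  have hp : (PySem.List.sorted (PySem.Set.ofList xs) (fun x => x) false).Pairwise (· < ·) :=
    PySem.List.sorted_ofList_pairwise_lt xs
  set hs := PySem.List.sorted (PySem.Set.ofList xs) (fun x => x) false with hhs
  by_cases h1 : hs.length = 1
  · simp only [if_pos h1]
  · simp only [if_neg h1]
    have hA := pvRangeOuter hs hs.length 0 (([] : List (Int × Int)), ([] : PySem.Set Int)) (by omega)
    simp only [Nat.cast_zero, List.drop_zero] at hA
    rw [hA]
    have hB := pvMain hs hp hs [] rfl [] ([] : PySem.Set Int)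
    simp only [List.map_nil] at hB
    rw [hB]
    set P := pvOuter hs (([] : List (Int × Int)), ([] : PySem.Set Int)) with hP
    by_cases hp1 : P.1 = []
    · obtain ⟨δ, d1, d2⟩ := pvOuter_inv hs (([] : List (Int × Int)), ([] : PySem.Set Int))
      have hδ : δ = [] := by
        have := d1; rw [← hP] at this; rw [hp1] at this; simpa using this.symm
      have hP2 : P.2 = ([] : PySem.Set Int) := by
        have := d2 hδ; rw [← hP] at this; exact this
      simp only [hp1, hP2, List.map_nil, ne_eq, not_true_eq_false, if_false]
      simp [PySem.Set.contains]
    · have hm1 : P.1.map pvFmt ≠ [] := by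
        simpa [List.map_eq_nil_iff] using hp1
      rw [if_pos hp1, if_pos hm1]
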